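-- pv_equiv track=rewrite | github.com/Macorov/Python-practice | untitled92.py | evenator
-- ===== SOURCE A (Python) =====
-- def evenator(s):
--
--     x = list(s)
--     p = ""
--
--     lst = [".", ",", "?", "!"]
--     f = ""
--     for elem in x:
--         if elem not in lst:
--             p = p + elem
--     k = p.split()
--     for elem in k:
--         if len(elem) % 2 != 0:
--             m = elem + elem[-1]
--             f = f + m
--         else:
--             f = f + elem
--         f = f + " "
--     return f
-- ===== SOURCE B (Python) =====
-- def evenator(s):
--     pieces = []
--     buf = []
--
--     def flush():
--         if buf:
--             pieces.append("".join(buf))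
--             if len(buf) % 2:
--                 pieces.append(buf[-1])
--             pieces.append(" ")
--             buf.clear()
--
--     for c in s:
--         if c in ".,?!":
--             continue
--         if c.isspace():
--             flush()
--         else:
--             buf.append(c)
--     flush()
--     return "".join(pieces)
-- ===== Notes on version B (the rewrite author's own statement) =====
-- stated objective: alternative
-- what changed: B is a single streaming character-level state machine with an explicit word buffer and a flush action (emit buffered word, doubling the last char when odd, then a space), replacing A's staged passes of building a punctuation-free copy, splitting it into words, and a second per-word loop.
import Mathlib
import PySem

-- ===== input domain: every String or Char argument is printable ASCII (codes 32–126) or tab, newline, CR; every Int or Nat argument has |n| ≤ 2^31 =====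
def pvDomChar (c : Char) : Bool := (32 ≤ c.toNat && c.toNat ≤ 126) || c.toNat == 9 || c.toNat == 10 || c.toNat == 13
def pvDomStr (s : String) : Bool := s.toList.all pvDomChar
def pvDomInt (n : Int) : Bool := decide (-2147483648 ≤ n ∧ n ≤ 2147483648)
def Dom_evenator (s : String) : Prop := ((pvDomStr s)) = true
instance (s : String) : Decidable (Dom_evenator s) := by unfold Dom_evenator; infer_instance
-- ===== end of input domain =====

-- B replaces A's staged passes (punctuation-free copy, then split, then a per-word loop)
-- by a single streaming character-level state machine with a word buffer and a flush
-- action; objective: alternative decomposition, same asymptotic cost.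

-- ===== PORT A =====
def evenator (s : String) : String :=
  let x := s.toList
  let lst : List Char := ['.', ',', '?', '!']
  let p := x.foldl (fun p elem => if !(lst.contains elem) then p ++ [elem] else p) []
  let k := PySem.Chars.split₀ p
  let f := k.foldl (fun f elem =>
      (if elem.length % 2 ≠ 0 then
        -- elem[-1]: words produced by split() are nonempty, so pyGetD's default is never used
        f ++ (elem ++ [PySem.List.pyGetD elem (-1) ' '])
      else f ++ elem) ++ [' ']) []
  String.ofList f

-- ===== PORT B =====
-- flush(): emit the buffered word, its last char again when its length is odd, and a space
def evFlush (pieces buf : List Char) : List Char :=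
  if buf.isEmpty then pieces
  else pieces ++ buf ++ (if buf.length % 2 = 1 then [PySem.List.pyGetD buf (-1) ' '] else []) ++ [' ']

def evenator_alt (s : String) : String :=
  let st := s.toList.foldl (fun (st : List Char × List Char) c =>
      if (['.', ',', '?', '!'] : List Char).contains c then st
      else if PySem.Chars.isspace c then (evFlush st.1 st.2, [])
      else (st.1, st.2 ++ [c])) (([] : List Char), ([] : List Char))
  String.ofList (evFlush st.1 st.2)

-- ===== PRECONDITION & SPEC =====
def Spec_evenator (s : String) (out : String) : Prop := out = evenator_alt s
instance (s : String) (out : String) : Decidable (Spec_evenator s out) := by unfold Spec_evenator; infer_instance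

-- ===== CLAIM (what is proved, stated in full; the proofs are below) =====
def Claim_equal_evenator : Prop := ∀ (s : String), Dom_evenator s → Spec_evenator s (evenator s)

-- ===== LEMMAS AND PROOFS =====

-- characters that survive the punctuation strip
def evKeep (c : Char) : Bool := !((['.', ',', '?', '!'] : List Char).contains c)

-- what one word contributes to the output
def emitOne (w : List Char) : List Char :=
  w ++ (if w.length % 2 = 1 then [PySem.List.pyGetD w (-1) ' '] else []) ++ [' ']

def emitAll (ws : List (List Char)) : List Char := (ws.map emitOne).flatten

-- the accumulator of split₀.go is a prefix
theorem go_acc : ∀ (cs cur : List Char) (acc : List (List Char)),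
    PySem.Chars.split₀.go cs cur acc = acc.reverse ++ PySem.Chars.split₀.go cs cur [] := by
  intro cs
  induction cs with
  | nil =>
      intro cur acc
      by_cases hc : cur.isEmpty <;> simp [PySem.Chars.split₀.go, hc]
  | cons c rest ih =>
      intro cur acc
      by_cases hs : PySem.Chars.isspace c
      · by_cases hc : cur.isEmpty
        · simp only [PySem.Chars.split₀.go, hs, hc, if_true]
          exact ih [] acc
        · simp only [PySem.Chars.split₀.go, hs, hc, if_true, if_false, Bool.false_eq_true]
          rw [ih [] (cur.reverse :: acc), ih [] [cur.reverse]]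
          simp
      · simp only [PySem.Chars.split₀.go, hs, Bool.false_eq_true, if_false]
        exact ih (c :: cur) acc

-- a space-free prefix just accumulates into the current word
theorem go_nospace : ∀ (buf : List Char), buf.all (fun c => !PySem.Chars.isspace c) = true →
    ∀ (rest cur : List Char) (acc : List (List Char)),
      PySem.Chars.split₀.go (buf ++ rest) cur acc
        = PySem.Chars.split₀.go rest (buf.reverse ++ cur) acc := by
  intro buf
  induction buf with
  | nil => intro _ rest cur acc; simp
  | cons b buf' ih =>
      intro h rest cur acc
      simp only [List.all_cons, Bool.and_eq_true, Bool.not_eq_true'] at h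
      simp only [List.cons_append, PySem.Chars.split₀.go, h.1, Bool.false_eq_true, if_false]
      rw [ih (by simp [List.all_eq_true] at h ⊢; exact h.2) rest (b :: cur) acc]
      simp

-- split₀ of a space-free list
theorem split₀_nospace (buf : List Char) (h : buf.all (fun c => !PySem.Chars.isspace c) = true) :
    PySem.Chars.split₀ buf = if buf.isEmpty then [] else [buf] := by
  unfold PySem.Chars.split₀
  rw [show buf = buf ++ [] by simp, go_nospace buf h [] [] []]
  by_cases hb : buf.isEmpty
  · simp [PySem.Chars.split₀.go, List.isEmpty_iff.mp hb]
  · have hne : buf ≠ [] := by simpa [List.isEmpty_iff] using hb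
    simp [PySem.Chars.split₀.go, hne]

-- split₀ of a space-free prefix, a space, and a remainder
theorem split₀_break (buf : List Char) (h : buf.all (fun c => !PySem.Chars.isspace c) = true)
    (c : Char) (hs : PySem.Chars.isspace c = true) (rest : List Char) :
    PySem.Chars.split₀ (buf ++ c :: rest)
      = (if buf.isEmpty then [] else [buf]) ++ PySem.Chars.split₀ rest := by
  unfold PySem.Chars.split₀
  rw [go_nospace buf h (c :: rest) [] []]
  by_cases hb : buf.isEmpty
  · simp [PySem.Chars.split₀.go, hs, List.isEmpty_iff.mp hb]
  · have hne : buf ≠ [] := by simpa [List.isEmpty_iff] using hb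
    simp only [List.append_nil]
    have hre : buf.reverse.isEmpty = false := by simp [hne]
    simp only [PySem.Chars.split₀.go, hs, if_true, hre, Bool.false_eq_true, if_false]
    rw [go_acc rest [] [buf.reverse.reverse]]
    simp [hb]

-- evFlush in terms of emitAll
theorem evFlush_eq (pieces buf : List Char) :
    evFlush pieces buf = pieces ++ emitAll (if buf.isEmpty then [] else [buf]) := by
  by_cases hb : buf.isEmpty <;> simp [evFlush, emitAll, emitOne, hb]

-- B's streaming loop computes emitAll over the words of the filtered remainder
theorem stream : ∀ (cs : List Char) (pieces buf : List Char),
    buf.all (fun c => !PySem.Chars.isspace c) = true →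
    evFlush (cs.foldl (fun (st : List Char × List Char) c =>
        if (['.', ',', '?', '!'] : List Char).contains c then st
        else if PySem.Chars.isspace c then (evFlush st.1 st.2, [])
        else (st.1, st.2 ++ [c])) (pieces, buf)).1
      (cs.foldl (fun (st : List Char × List Char) c =>
        if (['.', ',', '?', '!'] : List Char).contains c then st
        else if PySem.Chars.isspace c then (evFlush st.1 st.2, [])
        else (st.1, st.2 ++ [c])) (pieces, buf)).2
      = pieces ++ emitAll (PySem.Chars.split₀ (buf ++ cs.filter evKeep)) := by
  intro cs
  induction cs with
  | nil =>
      intro pieces buf hb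
      simp only [List.filter_nil, List.append_nil, List.foldl_nil]
      rw [split₀_nospace buf hb, evFlush_eq]
  | cons c rest ih =>
      intro pieces buf hb
      by_cases hp : (['.', ',', '?', '!'] : List Char).contains c
      · have hk : evKeep c = false := by simp only [evKeep, hp, Bool.not_true]
        simp only [List.foldl_cons, hp, if_true, List.filter_cons, hk, Bool.false_eq_true,
          if_false]
        exact ih pieces buf hb
      · have hp' : (['.', ',', '?', '!'] : List Char).contains c = false :=
          Bool.eq_false_iff.mpr hp
        have hk : evKeep c = true := by simp only [evKeep, hp', Bool.not_false]
        by_cases hs : PySem.Chars.isspace c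
        · simp only [List.foldl_cons, hp, Bool.false_eq_true, if_false, hs, if_true,
            List.filter_cons, hk]
          rw [ih (evFlush pieces buf) [] (by simp), split₀_break buf hb c hs, evFlush_eq]
          simp [emitAll]
        · simp only [List.foldl_cons, hp, Bool.false_eq_true, if_false, hs, List.filter_cons, hk,
            if_true]
          have hb' : (buf ++ [c]).all (fun c => !PySem.Chars.isspace c) = true := by
            simp_all
          rw [ih pieces (buf ++ [c]) hb']
          simp

-- A's word loop computes emitAll
theorem afold : ∀ (ws : List (List Char)) (f0 : List Char),
    ws.foldl (fun f elem =>
        (if elem.length % 2 ≠ 0 then f ++ (elem ++ [PySem.List.pyGetD elem (-1) ' '])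
         else f ++ elem) ++ [' ']) f0 = f0 ++ emitAll ws := by
  intro ws
  induction ws with
  | nil => intro f0; simp [emitAll]
  | cons w rest ih =>
      intro f0
      simp only [List.foldl_cons]
      rw [ih]
      by_cases hw : w.length % 2 = 1
      · simp [emitAll, emitOne, hw, List.append_assoc]
      · have h0 : ¬ w.length % 2 ≠ 0 := by omega
        simp [emitAll, emitOne, hw, h0, List.append_assoc]

-- A's character loop is a filter
theorem filt_fold (x : List Char) :
    x.foldl (fun p elem => if !((['.', ',', '?', '!'] : List Char).contains elem)
        then p ++ [elem] else p) []
      = x.filter evKeep := by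
  exact PySem.List.foldl_append_if_eq_filter evKeep x ([] : List Char)

theorem evenator_eq_alt (s : String) : evenator s = evenator_alt s := by
  simp only [evenator, evenator_alt, filt_fold, afold]
  rw [stream s.toList [] [] (by simp)]
  simp

-- ===== VERDICT (by name: the statement is the Claim_ definition above) =====
theorem evenator_spec : Claim_equal_evenator := by
  intro s _
  exact evenator_eq_alt s
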